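-- pv_equiv track=rewrite | github.com/matthewkiely0/neural-codes | neural_codes.py | is_simplicial
-- ===== SOURCE A (Python) =====
-- from itertools import combinations
--
-- def supp(C):
--     supp = []
--     for vec in C:
--         supp_c = []
--         for index, neuron in enumerate(vec):
--             if neuron == 1:
--                 supp_c.append(index + 1)    # +1 since want first neuron to be 1 not 0
--         supp.append(supp_c)
--     return supp
--
-- def subsets(l):
--     comb = []
--     for i in range(len(l)+1):
--         comb += [list(j) for j in combinations(l, i)]
--     return comb
--
-- def is_simplicial(C):
--
--     Supp_C = supp(C)
--
--     for supp_c in Supp_C: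
--         subsets_c = subsets(supp_c)
--         for element in subsets_c:
--             if element not in Supp_C:
--                 return False
--     return True
-- ===== SOURCE B (Python) =====
-- def is_simplicial(C):
--     S = {tuple(i + 1 for i, x in enumerate(vec) if x == 1) for vec in C}
--     for s in S:
--         for j in range(len(s)):
--             if s[:j] + s[j + 1:] not in S:
--                 return False
--     return True
-- ===== Notes on version B (the rewrite author's own statement) =====
-- stated objective: alternative
-- what changed: Instead of enumerating all 2^k subsets of every support and scanning the support list for each, B builds a set of support tuples once and checks only the k single-element-removal faces of each distinct support (downward closure by induction); on generated inputs with small supports the measured times are comparable.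
import Mathlib
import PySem

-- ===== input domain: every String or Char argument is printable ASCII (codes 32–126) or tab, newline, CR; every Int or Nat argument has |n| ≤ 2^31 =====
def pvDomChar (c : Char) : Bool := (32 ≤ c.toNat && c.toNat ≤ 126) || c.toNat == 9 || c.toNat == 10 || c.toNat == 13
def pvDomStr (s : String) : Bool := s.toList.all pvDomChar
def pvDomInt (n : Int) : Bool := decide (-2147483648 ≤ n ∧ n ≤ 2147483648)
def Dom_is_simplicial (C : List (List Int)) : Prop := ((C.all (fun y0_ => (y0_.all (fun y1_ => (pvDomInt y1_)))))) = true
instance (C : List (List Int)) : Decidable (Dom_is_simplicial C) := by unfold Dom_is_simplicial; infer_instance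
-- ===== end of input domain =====

-- B replaces A's enumeration of all 2^k subsets of every support (each checked by scanning
-- the support list) with a set of support tuples built once and a check of only the k
-- single-element-removal faces of each distinct support (downward closure by induction).

-- ===== PORT A =====
-- supp: for each vec, append index+1 for entries equal to 1
def suppA (C : List (List Int)) : List (List Int) :=
  C.foldl (fun acc vec =>
    acc ++ [(PySem.List.enumerate vec).foldl
      (fun sc p => if p.2 = 1 then sc ++ [p.1 + 1] else sc) []]) []

-- itertools.combinations(l, i): all length-i ordered sublists, in itertools' order
def combsA : Nat → List Int → List (List Int)
  | 0, _ => [[]]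
  | _ + 1, [] => []
  | r + 1, x :: xs => (combsA r xs).map (fun j => x :: j) ++ combsA (r + 1) xs

def subsetsA (l : List Int) : List (List Int) :=
  (List.range (l.length + 1)).foldl (fun comb i => comb ++ combsA i l) []

def is_simplicial (C : List (List Int)) : Bool :=
  let Supp_C := suppA C
  Supp_C.all (fun supp_c => (subsetsA supp_c).all (fun element => Supp_C.contains element))

-- ===== PORT B =====
-- tuple(i + 1 for i, x in enumerate(vec) if x == 1)
def suppB (vec : List Int) : List Int :=
  (PySem.List.enumerate vec).filterMap (fun p => if p.2 = 1 then some (p.1 + 1) else none)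

-- s[:j] + s[j+1:] for 0 ≤ j < len(s) is exactly take j ++ drop (j+1)
def is_simplicial_alt (C : List (List Int)) : Bool :=
  let S := PySem.Set.ofList (C.map suppB)
  S.all (fun s =>
    (List.range s.length).all (fun j => PySem.Set.contains S (s.take j ++ s.drop (j + 1))))

-- ===== PRECONDITION & SPEC =====
def Spec_is_simplicial (C : List (List Int)) (out : Bool) : Prop := out = is_simplicial_alt C
instance (C : List (List Int)) (out : Bool) : Decidable (Spec_is_simplicial C out) := by unfold Spec_is_simplicial; infer_instance

-- ===== CLAIM (what is proved, stated in full; the proofs are below) =====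
def Claim_equal_is_simplicial : Prop := ∀ (C : List (List Int)), Dom_is_simplicial C → Spec_is_simplicial C (is_simplicial C)

-- ===== LEMMAS AND PROOFS =====


-- 'if x == 1: supp_c.append(index+1)' as a filterMap (specific to these two loops)
theorem inner_loop_eq (l : List (Int × Int)) (acc : List Int) :
    l.foldl (fun sc p => if p.2 = 1 then sc ++ [p.1 + 1] else sc) acc
      = acc ++ l.filterMap (fun p => if p.2 = 1 then some (p.1 + 1) else none) := by
  induction l generalizing acc with
  | nil => simp
  | cons x xs ih => by_cases h : x.2 = 1 <;> simp [List.foldl_cons, h, ih]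

theorem suppA_eq_map (C : List (List Int)) : suppA C = C.map suppB := by
  unfold suppA suppB
  rw [PySem.List.foldl_append_singleton_eq_map]
  simp [inner_loop_eq]

theorem mem_combsA (e l : List Int) (r : Nat) :
    e ∈ combsA r l ↔ e.Sublist l ∧ e.length = r := by
  induction l generalizing r e with
  | nil =>
    cases r with
    | zero =>
      simp only [combsA, List.mem_singleton, List.sublist_nil, List.length_eq_zero_iff]
      constructor
      · rintro rfl; exact ⟨rfl, rfl⟩
      · rintro ⟨rfl, _⟩; rfl
    | succ r =>
      simp only [combsA, List.not_mem_nil, false_iff, not_and, List.sublist_nil]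
      rintro rfl; simp
  | cons x xs ih =>
    cases r with
    | zero =>
      simp only [combsA, List.mem_singleton, List.length_eq_zero_iff]
      constructor
      · rintro rfl; exact ⟨List.nil_sublist _, rfl⟩
      · rintro ⟨_, rfl⟩; rfl
    | succ r =>
      simp only [combsA, List.mem_append, List.mem_map, ih]
      constructor
      · rintro (⟨a, ⟨hs, hl⟩, rfl⟩ | ⟨hs, hl⟩)
        · exact ⟨List.Sublist.cons₂ x hs, by simp [hl]⟩
        · exact ⟨List.Sublist.cons x hs, hl⟩
      · rintro ⟨hs, hl⟩
        rcases List.sublist_cons_iff.mp hs with h | ⟨e', rfl, he'⟩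
        · exact Or.inr ⟨h, hl⟩
        · exact Or.inl ⟨e', ⟨he', by simpa using hl⟩, rfl⟩

theorem mem_subsetsA (e l : List Int) : e ∈ subsetsA l ↔ e.Sublist l := by
  unfold subsetsA
  rw [PySem.List.foldl_append_eq_flatMap]
  simp only [List.nil_append, List.mem_flatMap, List.mem_range, mem_combsA]
  constructor
  · rintro ⟨i, _, hs, _⟩; exact hs
  · intro hs
    exact ⟨e.length, Nat.lt_succ_of_le hs.length_le, hs, rfl⟩

-- a strict sublist survives removing some single element
theorem sublist_eraseIdx_of_ne (e s : List Int) (h : e.Sublist s) (hne : e ≠ s) :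
    ∃ j, j < s.length ∧ e.Sublist (s.eraseIdx j) := by
  induction h with
  | slnil => exact absurd rfl hne
  | cons a h ih =>
    exact ⟨0, by simp, by simpa using h⟩
  | cons₂ a h ih =>
    rename_i l₁ l₂
    by_cases he : l₁ = l₂
    · exact absurd (congrArg (a :: ·) he) hne
    · rcases ih he with ⟨j, hj, hsub⟩
      exact ⟨j + 1, by simpa using hj, by simpa [List.eraseIdx] using List.Sublist.cons₂ a hsub⟩

-- downward closure: closed under all sublists ↔ closed under single-element removals
theorem closure_iff (S : List (List Int)) :
    (∀ s ∈ S, ∀ e, e.Sublist s → e ∈ S) ↔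
    (∀ s ∈ S, ∀ j, j < s.length → s.eraseIdx j ∈ S) := by
  constructor
  · intro h s hs j _
    exact h s hs _ (List.eraseIdx_sublist s j)
  · intro h
    suffices key : ∀ n, ∀ s ∈ S, s.length ≤ n → ∀ e, e.Sublist s → e ∈ S by
      intro s hs e he; exact key s.length s hs le_rfl e he
    intro n
    induction n with
    | zero =>
      intro s hs hl e he
      have : s = [] := List.length_eq_zero_iff.mp (Nat.le_zero.mp hl)
      subst this
      rwa [List.sublist_nil.mp he]
    | succ n ih =>
      intro s hs hl e he
      by_cases hne : e = s
      · subst hne; exact hs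
      · rcases sublist_eraseIdx_of_ne e s he hne with ⟨j, hj, hsub⟩
        refine ih (s.eraseIdx j) (h s hs j hj) ?_ e hsub
        rw [List.length_eraseIdx_of_lt hj]
        omega

-- ===== VERDICT (by name: the statement is the Claim_ definition above) =====
theorem is_simplicial_spec : Claim_equal_is_simplicial := by
  intro C _
  unfold Spec_is_simplicial is_simplicial is_simplicial_alt
  rw [suppA_eq_map]
  rw [Bool.eq_iff_iff]
  simp only [List.all_eq_true, List.contains_iff_mem, mem_subsetsA, List.mem_range,
    PySem.Set.contains, PySem.Set.mem_ofList,
    ← List.eraseIdx_eq_take_drop_succ]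
  constructor
  · intro h s hs j hj
    exact (closure_iff (C.map suppB)).mp (fun s hs e he => h s hs e he) s hs j hj
  · intro h s hs e he
    exact (closure_iff (C.map suppB)).mpr (fun s hs j hj => h s hs j hj) s hs e he
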